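-- pv_equiv track=rewrite | github.com/jmanteau/fastapi-topaz | src/fastapi_topaz/dependencies.py | _policy_path_heuristic
-- ===== SOURCE A (Python) =====
-- def _policy_path_heuristic(path: str) -> str:
--     """
--     Convert a URL path to a policy path segment.
--
--     Examples:
--         "/" -> ""
--         "/documents" -> ".documents"
--         "/documents/{id}" -> ".documents.__id"
--         "/users/{user_id}/docs/{doc_id}" -> ".users.__user_id.docs.__doc_id"
--     """
--     if not path or path == "/":
--         return ""
--
--     # Remove leading slash and split into segments
--     segments = path.strip("/").split("/")
--     result_parts: list[str] = []
--
--     for segment in segments: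
--         if not segment:
--             continue
--         # Check if it's a path parameter (e.g., {id} or {user_id})
--         if segment.startswith("{") and segment.endswith("}"):
--             # Convert {param} to __param
--             param_name = segment[1:-1]
--             result_parts.append(f"__{param_name}")
--         else:
--             result_parts.append(segment)
--
--     if not result_parts:
--         return ""
--
--     return "." + ".".join(result_parts)
-- ===== SOURCE B (Python) =====
-- def _policy_path_heuristic(path: str) -> str:
--     """One-pass char scan: emit '.'-prefixed (and {param}->__param converted)
--     segments at each slash boundary instead of strip/split/join."""
--     if not path or path == "/":
--         return ""
--     out: list[str] = []
--     seg: list[str] = []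
--     for ch in path + "/":
--         if ch == "/":
--             if seg:
--                 if seg[0] == "{" and seg[-1] == "}":
--                     out.append("." + "__" + "".join(seg[1:-1]))
--                 else:
--                     out.append("." + "".join(seg))
--                 seg = []
--         else:
--             seg.append(ch)
--     return "".join(out)
-- ===== Notes on version B (the rewrite author's own statement) =====
-- stated objective: alternative
-- what changed: Replaced the strip/split/join pipeline with a single left-to-right character scan over the path plus a sentinel slash that accumulates the current segment and emits its dot-prefixed (and brace-parameter converted) form at each slash boundary.
import Mathlib
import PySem

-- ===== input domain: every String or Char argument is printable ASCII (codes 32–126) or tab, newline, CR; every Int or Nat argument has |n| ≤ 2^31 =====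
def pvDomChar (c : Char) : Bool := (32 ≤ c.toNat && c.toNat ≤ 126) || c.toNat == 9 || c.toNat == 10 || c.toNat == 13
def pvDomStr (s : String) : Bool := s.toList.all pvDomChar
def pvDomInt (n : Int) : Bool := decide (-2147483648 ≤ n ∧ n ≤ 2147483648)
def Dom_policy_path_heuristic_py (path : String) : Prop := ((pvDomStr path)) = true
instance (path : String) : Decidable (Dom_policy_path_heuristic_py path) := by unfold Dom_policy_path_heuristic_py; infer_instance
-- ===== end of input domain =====

-- B replaces A's strip/split/join pipeline by a single left-to-right character scan
-- that emits dot-prefixed (and brace-parameter converted) segments at slash boundaries (objective: alternative).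


-- ===== PORT A =====
def policy_path_heuristic_py (path : String) : String :=
  if path = "" ∨ path = "/" then ""
  else
    let segments := PySem.Chars.splitOn (PySem.Chars.stripChars path.toList ['/']) ['/']
    let result_parts := segments.foldl
      (fun acc segment =>
        if segment = [] then acc
        else if PySem.Chars.startswith segment ['{'] && PySem.Chars.endswith segment ['}'] then
          acc ++ [['_', '_'] ++ PySem.List.slice segment (some 1) (some (-1))]
        else acc ++ [segment]) []
    if result_parts = [] then ""
    else String.ofList ('.' :: PySem.Chars.join ['.'] result_parts)

-- ===== PORT B =====
-- the for-loop of Source B: state (out, seg), scanning the remaining characters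
def pvAltLoop : List Char → List Char → List Char → List Char
  | out, _, [] => out
  | out, seg, c :: rest =>
    if c = '/' then
      if seg ≠ [] then
        if PySem.List.pyGet? seg 0 = some '{' ∧ PySem.List.pyGet? seg (-1) = some '}' then
          pvAltLoop (out ++ '.' :: '_' :: '_' :: PySem.List.slice seg (some 1) (some (-1))) [] rest
        else pvAltLoop (out ++ '.' :: seg) [] rest
      else pvAltLoop out seg rest
    else pvAltLoop out (seg ++ [c]) rest

def policy_path_heuristic_py_alt (path : String) : String :=
  if path = "" ∨ path = "/" then ""
  else String.ofList (pvAltLoop [] [] (path.toList ++ ['/']))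

-- ===== PRECONDITION & SPEC =====
def Spec_policy_path_heuristic_py (path : String) (out : String) : Prop := out = policy_path_heuristic_py_alt path
instance (path : String) (out : String) : Decidable (Spec_policy_path_heuristic_py path out) := by unfold Spec_policy_path_heuristic_py; infer_instance

-- ===== CLAIM (what is proved, stated in full; the proofs are below) =====
def Claim_equal_policy_path_heuristic_py : Prop := ∀ (path : String), Dom_policy_path_heuristic_py path → Spec_policy_path_heuristic_py path (policy_path_heuristic_py path)

-- ===== LEMMAS AND PROOFS =====

-- functional model of PySem.Chars.splitOn.go on separator "/"
def pvSplit : List Char → List Char → List (List Char)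
  | cur, [] => [cur.reverse]
  | cur, c :: rest => if c = '/' then cur.reverse :: pvSplit [] rest else pvSplit (c :: cur) rest

def pvSegs (l : List Char) : List (List Char) := (pvSplit [] l).filter (· ≠ [])

-- A's per-segment transformation
def pvTA (seg : List Char) : List Char :=
  if PySem.Chars.startswith seg ['{'] && PySem.Chars.endswith seg ['}'] then
    ['_', '_'] ++ PySem.List.slice seg (some 1) (some (-1))
  else seg

-- what B emits for one nonempty segment
def pvK (seg : List Char) : List Char :=
  if PySem.List.pyGet? seg 0 = some '{' ∧ PySem.List.pyGet? seg (-1) = some '}' then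
    '.' :: '_' :: '_' :: PySem.List.slice seg (some 1) (some (-1))
  else '.' :: seg

def pvRender (ps : List (List Char)) : List Char := ((ps.filter (· ≠ [])).map pvK).flatten

lemma pv_go_spec : ∀ (fuel : Nat) (l cur : List Char) (acc : List (List Char)), l.length ≤ fuel →
    PySem.Chars.splitOn.go ['/'] fuel l cur acc = acc.reverse ++ pvSplit cur l := by
  intro fuel
  induction fuel with
  | zero =>
    intro l cur acc h
    have : l = [] := by cases l <;> simp_all
    subst this
    simp [PySem.Chars.splitOn.go, pvSplit]
  | succ n ih =>
    intro l cur acc h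
    cases l with
    | nil => simp [PySem.Chars.splitOn.go, pvSplit]
    | cons c rest =>
      by_cases hc : c = '/'
      · subst hc
        have : PySem.Chars.splitOn.go ['/'] (n+1) ('/' :: rest) cur acc
            = PySem.Chars.splitOn.go ['/'] n rest [] (cur.reverse :: acc) := by
          simp [PySem.Chars.splitOn.go, List.isPrefixOf]
        rw [this, ih rest [] (cur.reverse :: acc) (by simpa using Nat.lt_succ_iff.mp (by simpa using h))]
        simp [pvSplit]
      · have hpre : ['/'].isPrefixOf (c :: rest) = false := by
          show (('/' == c) && List.isPrefixOf ([] : List Char) rest) = false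
          simp [beq_eq_false_iff_ne, Ne.symm hc]
        have : PySem.Chars.splitOn.go ['/'] (n+1) (c :: rest) cur acc
            = PySem.Chars.splitOn.go ['/'] n rest (c :: cur) acc := by
          simp [PySem.Chars.splitOn.go, hpre]
        rw [this, ih rest (c :: cur) acc (by simpa using Nat.lt_succ_iff.mp (by simpa using h))]
        simp [pvSplit, hc]

lemma pv_splitOn_eq (l : List Char) : PySem.Chars.splitOn l ['/'] = pvSplit [] l := by
  unfold PySem.Chars.splitOn
  rw [pv_go_spec (l.length + 1) l [] [] (by omega)]
  simp

-- A's skip-empty/transform foldl is a filter-then-map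
lemma pv_foldA : ∀ (parts acc : List (List Char)),
    parts.foldl (fun acc segment =>
        if segment = [] then acc
        else if PySem.Chars.startswith segment ['{'] && PySem.Chars.endswith segment ['}'] then
          acc ++ [['_', '_'] ++ PySem.List.slice segment (some 1) (some (-1))]
        else acc ++ [segment]) acc
      = acc ++ (parts.filter (· ≠ [])).map pvTA := by
  intro parts
  induction parts with
  | nil => intro acc; simp
  | cons p ps ih =>
    intro acc
    by_cases hp : p = []
    · subst hp
      rw [List.foldl_cons, if_pos rfl, ih]
      simp
    · by_cases hc : (PySem.Chars.startswith p ['{'] && PySem.Chars.endswith p ['}']) = true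
      · rw [List.foldl_cons, if_neg hp, if_pos hc, ih]
        simp [hp, pvTA, hc]
      · rw [List.foldl_cons, if_neg hp, if_neg hc, ih]
        simp [hp, pvTA, hc]

lemma pv_pyGet_zero (a : Char) (rest : List Char) :
    PySem.List.pyGet? (a :: rest) (0 : Int) = some a := by
  simp [PySem.List.pyGet?, PySem.List.pyIdx?]

lemma pv_pyGet_neg_one (seg : List Char) (h : seg ≠ []) :
    PySem.List.pyGet? seg (-1 : Int) = seg.getLast? := by
  have hlen : 1 ≤ seg.length := by cases seg <;> simp_all
  simp only [PySem.List.pyGet?, PySem.List.pyIdx?]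
  norm_num [hlen, List.getLast?_eq_getElem?]

-- condition bridge: A's startswith/endswith test equals B's seg[0]/seg[-1] test on nonempty segments
lemma pv_cond_eq (seg : List Char) (h : seg ≠ []) :
    ((PySem.Chars.startswith seg ['{'] && PySem.Chars.endswith seg ['}']) = true)
      ↔ (PySem.List.pyGet? seg 0 = some '{' ∧ PySem.List.pyGet? seg (-1) = some '}') := by
  obtain ⟨a, rest, rfl⟩ := List.exists_cons_of_ne_nil h
  rw [Bool.and_eq_true, pv_pyGet_zero, pv_pyGet_neg_one _ h]
  constructor
  · rintro ⟨h1, h2⟩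
    constructor
    · obtain ⟨t, ht⟩ := (PySem.Chars.startswith_iff _ _).mp h1
      cases ht; rfl
    · obtain ⟨t, ht⟩ := (PySem.Chars.endswith_iff _ _).mp h2
      rw [← ht]; simp
  · rintro ⟨h1, h2⟩
    injection h1 with h1
    constructor
    · rw [PySem.Chars.startswith_iff]
      exact ⟨rest, by rw [h1]; rfl⟩
    · rw [PySem.Chars.endswith_iff]
      obtain ⟨t, ht⟩ := List.getLast?_eq_some_iff.mp h2
      exact ⟨t, by rw [ht]⟩

lemma pv_K_eq (seg : List Char) (h : seg ≠ []) : pvK seg = '.' :: pvTA seg := by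
  unfold pvK pvTA
  by_cases hc : PySem.List.pyGet? seg 0 = some '{' ∧ PySem.List.pyGet? seg (-1) = some '}'
  · rw [if_pos hc, if_pos ((pv_cond_eq seg h).mpr hc)]; rfl
  · rw [if_neg hc, if_neg (fun hh => hc ((pv_cond_eq seg h).mp hh))]

-- B's loop computes pvRender of the split
lemma pv_loopB : ∀ (l out seg : List Char),
    pvAltLoop out seg (l ++ ['/']) = out ++ pvRender (pvSplit seg.reverse l) := by
  intro l
  induction l with
  | nil =>
    intro out seg
    by_cases h : seg = []
    · subst h; simp [pvAltLoop, pvRender, pvSplit]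
    · simp only [List.nil_append, pvAltLoop, if_pos h]
      by_cases hc : PySem.List.pyGet? seg 0 = some '{' ∧ PySem.List.pyGet? seg (-1) = some '}' <;>
        simp [hc, pvRender, pvSplit, pvK, h]
  | cons c rest ih =>
    intro out seg
    by_cases hc : c = '/'
    · subst hc
      by_cases h : seg = []
      · subst h
        simp only [List.cons_append, pvAltLoop]
        simpa [pvRender, pvSplit] using ih out []
      · simp only [List.cons_append, pvAltLoop, if_pos h]
        by_cases hk : PySem.List.pyGet? seg 0 = some '{' ∧ PySem.List.pyGet? seg (-1) = some '}' <;>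
          · simp only [hk, if_pos, ih]
            simp [pvRender, pvSplit, pvK, h, hk]
    · simp only [List.cons_append, pvAltLoop, if_neg hc, ih]
      have : (seg ++ [c]).reverse = c :: seg.reverse := by simp
      rw [this]
      simp [pvSplit, hc]

-- prepend-dot flatten vs '.'-join
lemma pv_joinDot : ∀ (ps : List (List Char)),
    (ps.map (fun p => '.' :: p)).flatten
      = if ps = [] then [] else '.' :: PySem.Chars.join ['.'] ps := by
  intro ps
  induction ps with
  | nil => simp
  | cons p qs ih =>
    cases qs with
    | nil => simp [PySem.Chars.join, List.intercalate, List.intersperse]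
    | cons q rs =>
      simp only [List.map_cons, List.flatten_cons] at ih ⊢
      rw [ih]
      simp [PySem.Chars.join, List.intercalate, List.intersperse]

-- slash-run invariance of pvSegs
lemma pv_segs_prefix : ∀ (w v : List Char), (∀ c ∈ w, c = '/') → pvSegs (w ++ v) = pvSegs v := by
  intro w
  induction w with
  | nil => intro v _; rfl
  | cons c w' ih =>
    intro v h
    have hc : c = '/' := h c (by simp)
    subst hc
    have : pvSplit [] ('/' :: (w' ++ v)) = [] :: pvSplit [] (w' ++ v) := by simp [pvSplit]
    unfold pvSegs
    rw [List.cons_append, this, List.filter_cons]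
    simpa [pvSegs] using ih v (fun c hc => h c (by simp [hc]))

lemma pv_split_all_slash : ∀ (w cur : List Char), (∀ c ∈ w, c = '/') →
    (pvSplit cur w).filter (· ≠ []) = [cur.reverse].filter (· ≠ []) := by
  intro w
  induction w with
  | nil => intro cur _; rfl
  | cons c w' ih =>
    intro cur h
    have hc : c = '/' := h c (by simp)
    subst hc
    have h' : ∀ c ∈ w', c = '/' := fun c hc => h c (by simp [hc])
    simp only [pvSplit, if_true, List.filter_cons]
    rw [ih [] h']
    simp

lemma pv_segs_suffix_aux : ∀ (v cur w : List Char), (∀ c ∈ w, c = '/') →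
    (pvSplit cur (v ++ w)).filter (· ≠ []) = (pvSplit cur v).filter (· ≠ []) := by
  intro v
  induction v with
  | nil =>
    intro cur w h
    simpa [pvSplit] using pv_split_all_slash w cur h
  | cons c v' ih =>
    intro cur w h
    by_cases hc : c = '/'
    · subst hc
      simp only [List.cons_append, pvSplit, if_true, List.filter_cons]
      rw [ih [] w h]
    · simp only [List.cons_append, pvSplit, if_neg hc]
      exact ih (c :: cur) w h

lemma pv_segs_suffix (v w : List Char) (h : ∀ c ∈ w, c = '/') : pvSegs (v ++ w) = pvSegs v :=
  pv_segs_suffix_aux v [] w h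

lemma pv_segs_strip (s : List Char) : pvSegs (PySem.Chars.stripChars s ['/']) = pvSegs s := by
  have hpc : ∀ c : Char, (['/'].contains c) = true → c = '/' := by
    intro c hc
    simpa using List.contains_iff_mem.mp hc
  have hstrip : PySem.Chars.stripChars s ['/']
      = (List.dropWhile (fun c => ['/'].contains c)
          ((List.dropWhile (fun c => ['/'].contains c) s).reverse)).reverse := rfl
  set p : Char → Bool := fun c => ['/'].contains c with hp
  set u : List Char := List.dropWhile p s with hu
  have h1 : pvSegs s = pvSegs u := by
    conv_lhs => rw [← List.takeWhile_append_dropWhile (p := p) (l := s)]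
    rw [← hu]
    exact pv_segs_prefix _ _ (fun c hc => hpc c (List.mem_takeWhile_imp hc))
  have h2 : u = (List.dropWhile p u.reverse).reverse ++ (List.takeWhile p u.reverse).reverse := by
    have h3 := List.takeWhile_append_dropWhile (p := p) (l := u.reverse)
    conv_lhs => rw [← List.reverse_reverse u, ← h3, List.reverse_append]
  rw [hstrip, h1]
  conv_rhs => rw [h2]
  rw [pv_segs_suffix]
  intro c hc
  exact hpc c (List.mem_takeWhile_imp (List.mem_reverse.mp hc))

-- ===== VERDICT (by name: the statement is the Claim_ definition above) =====
theorem policy_path_heuristic_py_spec : Claim_equal_policy_path_heuristic_py := by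
  intro path _
  unfold Spec_policy_path_heuristic_py policy_path_heuristic_py policy_path_heuristic_py_alt
  by_cases hg : path = "" ∨ path = "/"
  · simp [hg]
  · rw [if_neg hg, if_neg hg]
    simp only [pv_splitOn_eq, pv_foldA, List.nil_append]
    rw [pv_loopB path.toList [] [], List.nil_append, List.reverse_nil]
    rw [show (pvSplit [] (PySem.Chars.stripChars path.toList ['/'])).filter (· ≠ [])
        = pvSegs (PySem.Chars.stripChars path.toList ['/']) from rfl]
    have hK : (pvSegs (PySem.Chars.stripChars path.toList ['/'])).map pvK
        = ((pvSegs (PySem.Chars.stripChars path.toList ['/'])).map pvTA).map (fun p => '.' :: p) := by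
      rw [List.map_map]
      refine List.map_congr_left (fun s hs => ?_)
      have hne : s ≠ [] := by
        have := List.of_mem_filter hs
        simpa using this
      simp [pv_K_eq s hne]
    have hR : pvRender (pvSplit [] path.toList)
        = (((pvSegs (PySem.Chars.stripChars path.toList ['/'])).map pvTA).map
            (fun p => '.' :: p)).flatten := by
      have h0 : pvRender (pvSplit [] path.toList) = ((pvSegs path.toList).map pvK).flatten := rfl
      rw [h0, ← pv_segs_strip path.toList, hK]
    rw [hR, pv_joinDot]
    by_cases hx : (pvSegs (PySem.Chars.stripChars path.toList ['/'])).map pvTA = []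
    · rw [if_pos hx, if_pos hx]
    · rw [if_neg hx, if_neg hx]
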